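-- pv_equiv track=rewrite | github.com/aunnam/dsp | python/advanced_python_dict.py | q6Dict
-- ===== SOURCE A (Python) =====
-- def q6Dict(data):
--     dict1 = {}
--     for row in data[1:]:
--         name = row[0]
--         splitName = name.split(' ')
--         if len(splitName)==2:
--             lastName = splitName[1]
--         else:
--             lastName = splitName[2]
--         if lastName in dict1:
--             dict1[lastName] += [row[1:]]
--         else:
--             dict1[lastName] = [row[1:]]
--     return dict1
-- ===== SOURCE B (Python) =====
-- def q6Dict(data):
--     rows = data[1:]
--
--     def lastName(row):
--         parts = row[0].split(' ')
--         return parts[1] if len(parts) == 2 else parts[2]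
--
--     keys = [lastName(r) for r in rows]
--     out = {}
--     for k in dict.fromkeys(keys):
--         out[k] = [r[1:] for r, kk in zip(rows, keys) if kk == k]
--     return out
-- ===== Notes on version B (the rewrite author's own statement) =====
-- stated objective: alternative
-- what changed: Replaces A's single-pass dict bucketing (membership test + append/insert per row) with a two-pass decomposition: compute every row's last-name key once, dedupe the keys in first-appearance order, then build each group by a per-key scan over the precomputed (row, key) pairs.
import Mathlib
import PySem

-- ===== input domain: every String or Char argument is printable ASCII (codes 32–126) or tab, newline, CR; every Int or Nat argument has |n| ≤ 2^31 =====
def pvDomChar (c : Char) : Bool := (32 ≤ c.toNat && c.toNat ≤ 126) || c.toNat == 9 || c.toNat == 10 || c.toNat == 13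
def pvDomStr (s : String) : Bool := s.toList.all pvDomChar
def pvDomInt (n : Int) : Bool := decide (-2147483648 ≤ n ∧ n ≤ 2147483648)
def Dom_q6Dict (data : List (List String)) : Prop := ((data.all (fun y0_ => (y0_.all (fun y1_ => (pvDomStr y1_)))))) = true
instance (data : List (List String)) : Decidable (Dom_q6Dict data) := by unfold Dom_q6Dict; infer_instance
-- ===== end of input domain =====

-- B replaces A's one-pass hash bucketing by a two-pass decomposition: compute all keys once,
-- then emit one group per distinct key by a per-key scan (objective: alternative).

-- ===== PORT A =====
def q6Dict (data : List (List String)) : List (String × List (List String)) :=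
  ((PySem.List.slice data (some 1) none).foldl
    (fun (dict1 : PySem.Dict String (List (List String))) row =>
      let name := (PySem.List.pyGet? row 0).getD ""
      let splitName := (PySem.Str.split? name " ").getD []
      let lastName :=
        if splitName.length == 2 then (PySem.List.pyGet? splitName 1).getD ""
        else (PySem.List.pyGet? splitName 2).getD ""
      if dict1.contains lastName then
        dict1.insert lastName (dict1.getD lastName [] ++ [PySem.List.slice row (some 1) none])
      else
        dict1.insert lastName [PySem.List.slice row (some 1) none])
    PySem.Dict.empty).items

-- ===== PORT B =====
def q6LastName (row : List String) : String :=
  let parts := (PySem.Str.split? ((PySem.List.pyGet? row 0).getD "") " ").getD []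
  if parts.length == 2 then (PySem.List.pyGet? parts 1).getD ""
  else (PySem.List.pyGet? parts 2).getD ""

def q6Dict_alt (data : List (List String)) : List (String × List (List String)) :=
  let rows := PySem.List.slice data (some 1) none
  let keys := rows.map q6LastName
  ((PySem.List.dedup keys).foldl
    (fun (out : PySem.Dict String (List (List String))) k =>
      out.insert k (((rows.zip keys).filter (fun p => p.2 == k)).map
        (fun p => PySem.List.slice p.1 (some 1) none)))
    PySem.Dict.empty).items

-- ===== PRECONDITION & SPEC =====
-- Pre_ excludes exactly the inputs where the Python raises: a data row (after the header)
-- that is empty (IndexError on row[0]) or whose name splits into fewer than 2 parts, or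
-- exactly not-2 and fewer than 3 parts (IndexError on splitName[1]/splitName[2]).
def Pre_q6Dict (data : List (List String)) : Prop :=
  ∀ row ∈ data.tail, row ≠ [] ∧
    (let p := (PySem.Str.split? ((PySem.List.pyGet? row 0).getD "") " ").getD []
     p.length = 2 ∨ 3 ≤ p.length)
instance (data : List (List String)) : Decidable (Pre_q6Dict data) := by unfold Pre_q6Dict; infer_instance

def pvWitness_q6Dict : List (List String) :=
  [["name", "id"], ["Ann Bee", "1"], ["Cy Dee Bee", "2"], ["Eve Bee", "3"]]

def Spec_q6Dict (data : List (List String)) (out : List (String × List (List String))) : Prop := out = q6Dict_alt data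
instance (data : List (List String)) (out : List (String × List (List String))) : Decidable (Spec_q6Dict data out) := by unfold Spec_q6Dict; infer_instance

-- ===== CLAIM (what is proved, stated in full; the proofs are below) =====
def Claim_equal_q6Dict : Prop := ∀ (data : List (List String)), Dom_q6Dict data → Pre_q6Dict data → Spec_q6Dict data (q6Dict data)

-- ===== LEMMAS AND PROOFS =====

-- abbreviation used only by the proofs
def q6Tail (row : List String) : List String := PySem.List.slice row (some 1) none

-- A's loop body (lookup-append / fresh-insert) is exactly a modify with default [].
theorem q6_stepA (d : PySem.Dict String (List (List String))) (row : List String) :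
    (let name := (PySem.List.pyGet? row 0).getD ""
     let splitName := (PySem.Str.split? name " ").getD []
     let lastName :=
       if splitName.length == 2 then (PySem.List.pyGet? splitName 1).getD ""
       else (PySem.List.pyGet? splitName 2).getD ""
     if d.contains lastName then
       d.insert lastName (d.getD lastName [] ++ [PySem.List.slice row (some 1) none])
     else
       d.insert lastName [PySem.List.slice row (some 1) none])
    = d.modify (q6LastName row) [] (· ++ [PySem.List.slice row (some 1) none]) := by
  show (if d.contains (q6LastName row) then
          d.insert (q6LastName row) (d.getD (q6LastName row) [] ++ [PySem.List.slice row (some 1) none])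
        else d.insert (q6LastName row) [PySem.List.slice row (some 1) none]) = _
  cases h : d.contains (q6LastName row)
  · simp [PySem.Dict.modify, PySem.Dict.getD_of_not_contains d [] h]
  · simp [PySem.Dict.modify]

-- the common normal form both ports reduce to
theorem q6_A_norm (rows : List (List String)) :
    (rows.foldl
      (fun (dict1 : PySem.Dict String (List (List String))) row =>
        let name := (PySem.List.pyGet? row 0).getD ""
        let splitName := (PySem.Str.split? name " ").getD []
        let lastName :=
          if splitName.length == 2 then (PySem.List.pyGet? splitName 1).getD ""
          else (PySem.List.pyGet? splitName 2).getD ""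
        if dict1.contains lastName then
          dict1.insert lastName (dict1.getD lastName [] ++ [PySem.List.slice row (some 1) none])
        else
          dict1.insert lastName [PySem.List.slice row (some 1) none])
      PySem.Dict.empty).items
    = (PySem.List.dedup (rows.map q6LastName)).map
        (fun k => (k, (rows.filter (fun r => q6LastName r == k)).map q6Tail)) := by
  have hstep : (fun (dict1 : PySem.Dict String (List (List String))) row =>
        let name := (PySem.List.pyGet? row 0).getD ""
        let splitName := (PySem.Str.split? name " ").getD []
        let lastName :=
          if splitName.length == 2 then (PySem.List.pyGet? splitName 1).getD ""
          else (PySem.List.pyGet? splitName 2).getD ""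
        if dict1.contains lastName then
          dict1.insert lastName (dict1.getD lastName [] ++ [PySem.List.slice row (some 1) none])
        else
          dict1.insert lastName [PySem.List.slice row (some 1) none])
      = fun d row => d.modify (q6LastName row) [] (· ++ [PySem.List.slice row (some 1) none]) :=
    funext fun d => funext fun row => q6_stepA d row
  rw [hstep]
  have hfold : rows.foldl
        (fun d row => PySem.Dict.modify d (q6LastName row) [] (· ++ [PySem.List.slice row (some 1) none]))
        PySem.Dict.empty
      = (rows.map (fun r => (q6LastName r, q6Tail r))).foldl
        (fun d p => PySem.Dict.modify d p.1 [] (· ++ [p.2])) PySem.Dict.empty := by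
    rw [List.foldl_map]
    rfl
  rw [hfold]

  have hnd : ((rows.map (fun r => (q6LastName r, q6Tail r))).foldl
        (fun d p => PySem.Dict.modify d p.1 [] (· ++ [p.2])) PySem.Dict.empty).keys.Nodup :=
    PySem.Dict.nodup_keys_foldl_modify_key _ Prod.fst [] (fun _ p => (· ++ [p.2]))
      PySem.Dict.empty (by simp)
  rw [PySem.Dict.items_eq_map_keys _ hnd []]
  have hkeys : ((rows.map (fun r => (q6LastName r, q6Tail r))).foldl
        (fun d p => PySem.Dict.modify d p.1 [] (· ++ [p.2])) PySem.Dict.empty).keys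
      = PySem.Set.update (PySem.Dict.empty : PySem.Dict String (List (List String))).keys
          ((rows.map (fun r => (q6LastName r, q6Tail r))).map Prod.fst) :=
    PySem.Dict.keys_foldl_modify_key _ Prod.fst [] (fun _ p => (· ++ [p.2])) PySem.Dict.empty
  rw [hkeys]
  have hkeys2 : PySem.Set.update (PySem.Dict.empty : PySem.Dict String (List (List String))).keys
        ((rows.map (fun r => (q6LastName r, q6Tail r))).map Prod.fst)
      = PySem.List.dedup (rows.map q6LastName) := by
    simp only [PySem.Dict.keys_empty, List.map_map]
    simp only [PySem.List.dedup_eq_ofList]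
    rfl
  rw [hkeys2]
  refine List.map_congr_left fun k _ => ?_
  rw [PySem.Dict.getD_foldl_modify_append]
  simp [List.filter_map, List.map_map, Function.comp_def]

theorem q6_B_norm (rows : List (List String)) :
    ((PySem.List.dedup (rows.map q6LastName)).foldl
      (fun (out : PySem.Dict String (List (List String))) k =>
        out.insert k (((rows.zip (rows.map q6LastName)).filter (fun p => p.2 == k)).map
          (fun p => PySem.List.slice p.1 (some 1) none)))
      PySem.Dict.empty).items
    = (PySem.List.dedup (rows.map q6LastName)).map
        (fun k => (k, (rows.filter (fun r => q6LastName r == k)).map q6Tail)) := by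
  refine Eq.trans (PySem.Dict.items_foldl_insert_fresh (PySem.List.dedup (rows.map q6LastName)) id
    (fun k => ((rows.zip (rows.map q6LastName)).filter (fun p => p.2 == k)).map
      (fun p => PySem.List.slice p.1 (some 1) none))
    PySem.Dict.empty (by simp) (by simp)) ?_
  refine (List.nil_append _).trans (List.map_congr_left fun k _ => ?_)
  rw [← List.map_prod_left_eq_zip]
  simp [List.filter_map, List.map_map, Function.comp_def, q6Tail]

-- ===== VERDICT (by name: the statement is the Claim_ definition above) =====
theorem q6Dict_spec : Claim_equal_q6Dict := by
  intro data _ _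
  unfold Spec_q6Dict q6Dict q6Dict_alt
  rw [q6_A_norm, q6_B_norm]
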